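-- pv_equiv track=rewrite | github.com/Mr-Duo/NewCrawler | utils/line_parser.py | split_diff_log
-- ===== SOURCE A (Python) =====
-- def split_diff_log(file_diff_log):
--     """
--     Split the log of a commit into a list of diff
--     """
--     files_log, file_log = [], []
--     for line in file_diff_log:
--         if line[:10] == "diff --git":
--             if file_log:
--                 files_log.append(file_log)
--             file_log = []
--             file_log.append(line)
--         else:
--             file_log.append(line)
--
--     if file_log:
--         files_log.append(file_log)
--
--     return files_log
-- ===== SOURCE B (Python) =====
-- def split_diff_log(file_diff_log):
--     """
--     Split the log of a commit into a list of diff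
--     """
--     lines = list(file_diff_log)
--     groups = []
--     while lines:
--         k = 1
--         while k < len(lines) and lines[k][:10] != "diff --git":
--             k += 1
--         groups.append(lines[:k])
--         lines = lines[k:]
--     return groups
-- ===== Notes on version B (the rewrite author's own statement) =====
-- stated objective: alternative
-- what changed: B slices whole groups at once: for each remaining suffix it scans for the index of the next 'diff --git' boundary and cuts lines[:k]/lines[k:], instead of A's line-by-line accumulator with flushes at boundaries and at the end.
import Mathlib
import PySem

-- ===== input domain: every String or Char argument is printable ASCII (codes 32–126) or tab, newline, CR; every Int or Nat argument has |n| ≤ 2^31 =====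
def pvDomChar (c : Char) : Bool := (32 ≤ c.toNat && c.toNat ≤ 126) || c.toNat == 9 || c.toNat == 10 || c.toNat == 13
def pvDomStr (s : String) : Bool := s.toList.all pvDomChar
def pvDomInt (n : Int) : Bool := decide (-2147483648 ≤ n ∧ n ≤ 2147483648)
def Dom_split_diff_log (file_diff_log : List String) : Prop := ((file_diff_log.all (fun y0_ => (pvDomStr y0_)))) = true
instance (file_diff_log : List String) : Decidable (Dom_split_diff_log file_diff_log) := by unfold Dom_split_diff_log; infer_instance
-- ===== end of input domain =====

-- B cuts a whole group per step (scan to next 'diff --git' boundary, then slice) instead of A's line-by-line accumulator with flushes; same O(n) result.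


-- ===== PORT A =====
-- A: forward fold over the lines with state (files_log, file_log); flush file_log at each boundary and at the end.
def split_diff_log (file_diff_log : List String) : List (List String) :=
  let r := file_diff_log.foldl
    (fun (st : List (List String) × List String) (line : String) =>
      if PySem.Str.slice line none (some 10) == "diff --git" then
        ((if st.2 ≠ [] then st.1 ++ [st.2] else st.1), [line])
      else
        (st.1, st.2 ++ [line]))
    ([], [])
  if r.2 ≠ [] then r.1 ++ [r.2] else r.1

-- ===== PORT B =====
-- "not a boundary line" (the inner while-loop's continuation test)
def pvCont (line : String) : Bool := !(PySem.Str.slice line none (some 10) == "diff --git")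

-- B: while lines nonempty, the inner while finds k = index of the next boundary after position 0
-- (so lines[1:k] = takeWhile pvCont of the tail), cut lines[:k] as a group and continue with lines[k:].
def pvAltGo (lines : List String) : List (List String) :=
  match lines with
  | [] => []
  | l :: rest => (l :: rest.takeWhile pvCont) :: pvAltGo (rest.dropWhile pvCont)
termination_by lines.length
decreasing_by
  simp only [List.length_cons]
  exact Nat.lt_succ_of_le (List.length_dropWhile_le pvCont rest)

def split_diff_log_alt (file_diff_log : List String) : List (List String) :=
  pvAltGo file_diff_log

-- ===== PRECONDITION & SPEC =====
def Spec_split_diff_log (file_diff_log : List String) (out : List (List String)) : Prop := out = split_diff_log_alt file_diff_log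
instance (file_diff_log : List String) (out : List (List String)) : Decidable (Spec_split_diff_log file_diff_log out) := by unfold Spec_split_diff_log; infer_instance

-- ===== CLAIM (what is proved, stated in full; the proofs are below) =====
def Claim_equal_split_diff_log : Prop := ∀ (file_diff_log : List String), Dom_split_diff_log file_diff_log → Spec_split_diff_log file_diff_log (split_diff_log file_diff_log)

-- ===== LEMMAS AND PROOFS =====

-- A's step function (definitionally the one in the port)
def pvStepA (st : List (List String) × List String) (line : String) :
    List (List String) × List String :=
  if PySem.Str.slice line none (some 10) == "diff --git" then
    ((if st.2 ≠ [] then st.1 ++ [st.2] else st.1), [line])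
  else
    (st.1, st.2 ++ [line])

-- core invariant: with a nonempty current group, A's flushed fold equals
-- files ++ [cur ++ the non-boundary prefix] followed by B's groups of the remaining suffix
theorem pv_main (xs : List String) : ∀ (files : List (List String)) (cur : List String),
    cur ≠ [] →
    (let r := xs.foldl pvStepA (files, cur); if r.2 ≠ [] then r.1 ++ [r.2] else r.1)
      = files ++ ((cur ++ xs.takeWhile pvCont) :: pvAltGo (xs.dropWhile pvCont)) := by
  induction xs with
  | nil =>
      intro files cur hc
      simp [pvAltGo, hc]
  | cons l rest ih =>
      intro files cur hc
      cases hb : (PySem.Str.slice l none (some 10) == "diff --git") with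
      | true =>
          simp only [List.foldl_cons, pvStepA, hb, hc, if_pos, ne_eq, not_false_iff]
          rw [ih (files ++ [cur]) [l] (by simp)]
          have hcont : pvCont l = false := by simp [pvCont, hb]
          simp [hcont, pvAltGo]
      | false =>
          simp only [List.foldl_cons, pvStepA, hb, Bool.false_eq_true, if_false]
          rw [ih files (cur ++ [l]) (by simp)]
          have hcont : pvCont l = true := by simp [pvCont, hb]
          simp [hcont]

theorem pv_ab (xs : List String) : split_diff_log xs = split_diff_log_alt xs := by
  cases xs with
  | nil => simp [split_diff_log, split_diff_log_alt, pvAltGo]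
  | cons l rest =>
      have hstep : pvStepA ([], []) l = ([], [l]) := by
        unfold pvStepA
        cases hb : (PySem.Str.slice l none (some 10) == "diff --git") <;> simp
      have ha : split_diff_log (l :: rest) =
          (let r := rest.foldl pvStepA ([], [l]);
           if r.2 ≠ [] then r.1 ++ [r.2] else r.1) := by
        show (let r := (l :: rest).foldl pvStepA ([], []);
              if r.2 ≠ [] then r.1 ++ [r.2] else r.1) = _
        rw [List.foldl_cons, hstep]
      rw [ha, pv_main rest [] [l] (by simp)]
      simp [split_diff_log_alt, pvAltGo]

-- ===== VERDICT (by name: the statement is the Claim_ definition above) =====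
theorem split_diff_log_spec : Claim_equal_split_diff_log := by
  intro xs _
  unfold Spec_split_diff_log
  exact pv_ab xs
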